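-- pv_equiv track=rewrite | github.com/sergiorgiraldo/Python-lang | data-engineering-interview-patterns/patterns/02_two_pointers/de_scenarios/data_compaction.py | compact_full
-- ===== SOURCE A (Python) =====
-- from typing import Any
--
-- def compact_full(
--     records: list[dict],
--     key: str = "id",
--     status_field: str = "status",
--     deleted_value: str = "deleted",
-- ) -> int:
--     """
--     Combined compaction: remove deleted AND deduplicate in one pass.
--
--     For sorted data, this handles both operations simultaneously.
--     The write pointer only advances when the record is:
--     1. Not deleted, AND
--     2. Not a duplicate of the previous written record
--
--     Time: O(n)  Space: O(1)
--     """
--     if not records: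
--         return 0
--
--     write = 0
--     last_written_key: Any = None
--
--     for read in range(len(records)):
--         record = records[read]
--
--         # Skip deleted records
--         if record.get(status_field) == deleted_value:
--             continue
--
--         # Skip duplicates (compared against last written, not last read)
--         if record[key] == last_written_key:
--             continue
--
--         records[write] = record
--         last_written_key = record[key]
--         write += 1
--
--     return write
-- ===== SOURCE B (Python) =====
-- from itertools import groupby
--
--
-- def compact_full(
--     records: list[dict],
--     key: str = "id",
--     status_field: str = "status",
--     deleted_value: str = "deleted",
-- ) -> int:
--     """Filter deleted records, collapse consecutive duplicate keys with
--     groupby, then write the compacted records back in place (length kept)."""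
--     kept = [r for r in records if r.get(status_field) != deleted_value]
--     compacted = [next(g) for _, g in groupby(kept, key=lambda r: r[key])]
--     for i, r in enumerate(compacted):
--         records[i] = r
--     return len(compacted)
-- ===== Notes on version B (the rewrite author's own statement) =====
-- stated objective: alternative
-- what changed: A's single write-pointer sweep that interleaves deletion-skipping and duplicate-skipping is replaced by a pipeline: filter out deleted records, collapse consecutive equal keys with itertools.groupby, write the compacted records back by index, return the group count.
import Mathlib
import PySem

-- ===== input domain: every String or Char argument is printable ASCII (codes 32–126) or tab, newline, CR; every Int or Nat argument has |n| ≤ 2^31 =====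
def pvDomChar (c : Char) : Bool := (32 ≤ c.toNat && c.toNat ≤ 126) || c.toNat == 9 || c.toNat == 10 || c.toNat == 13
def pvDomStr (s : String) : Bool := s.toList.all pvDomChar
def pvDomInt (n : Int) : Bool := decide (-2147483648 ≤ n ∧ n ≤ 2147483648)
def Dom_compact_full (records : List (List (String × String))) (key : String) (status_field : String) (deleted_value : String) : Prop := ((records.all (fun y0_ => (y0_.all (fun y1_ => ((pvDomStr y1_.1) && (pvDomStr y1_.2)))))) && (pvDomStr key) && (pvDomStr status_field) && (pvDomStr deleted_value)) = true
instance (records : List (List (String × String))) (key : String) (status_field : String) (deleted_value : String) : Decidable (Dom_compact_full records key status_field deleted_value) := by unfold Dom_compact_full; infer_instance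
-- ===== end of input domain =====

-- B changes the decomposition: filter deleted records first, then group consecutive equal keys
-- (itertools.groupby) and count the groups, instead of A's single write-pointer sweep; equivalence
-- is about the RETURN value (both Pythons mutate `records` in place the same way, not modeled here).

-- dict lookup d.get(f): first matching key (shared helper, not a port)
def dictGet? (r : List (String × String)) (f : String) : Option String :=
  (r.find? (fun p => p.1 == f)).map (·.2)

-- ===== PORT A =====
-- literal port of A's loop: state = (records buffer, write pointer, last written key);
-- records[read] is always in range, so pyGetD's default [] is never used.
def compact_full (records : List (List (String × String))) (key : String) (status_field : String) (deleted_value : String) : Int :=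
  if records = [] then 0
  else
    ((PySem.List.pyRange 0 (records.length : Int) 1).foldl
      (fun (s : List (List (String × String)) × Int × Option String) read =>
        let record := PySem.List.pyGetD s.1 read []
        if dictGet? record status_field == some deleted_value then s
        else if dictGet? record key == s.2.2 then s
        else (s.1.set s.2.1.toNat record, s.2.1 + 1, dictGet? record key))
      (records, 0, none)).2.1

-- ===== PORT B =====
-- itertools.groupby on the kept list: consecutive runs of equal group-key
def chunkBy (f : List (String × String) → List (String × String) → Bool) :
    List (List (String × String)) → List (List (List (String × String)))
  | [] => []
  | a :: rest => (a :: rest.takeWhile (f a)) :: chunkBy f (rest.dropWhile (f a))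
  termination_by l => l.length
  decreasing_by exact Nat.lt_succ_of_le (List.length_dropWhile_le _ _)

def compact_full_alt (records : List (List (String × String))) (key : String) (status_field : String) (deleted_value : String) : Int :=
  let kept := records.filter (fun r => !(dictGet? r status_field == some deleted_value))
  let compacted :=
    (chunkBy (fun a b => dictGet? a key == dictGet? b key) kept).map (fun g => g.headD [])
  (compacted.length : Int)

-- ===== PRECONDITION & SPEC =====
-- Pre_ excludes exactly the inputs where Python A raises KeyError: a record that is not
-- marked deleted but has no `key` field (both Pythons raise there).
def Pre_compact_full (records : List (List (String × String))) (key : String) (status_field : String) (deleted_value : String) : Prop :=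
  records.all (fun r => (dictGet? r status_field == some deleted_value) || (dictGet? r key).isSome) = true
instance (records : List (List (String × String))) (key : String) (status_field : String) (deleted_value : String) : Decidable (Pre_compact_full records key status_field deleted_value) := by unfold Pre_compact_full; infer_instance

def pvWitness_compact_full : (List (List (String × String))) × String × String × String :=
  ([[("id", "1"), ("status", "live")], [("id", "1")], [("id", "2"), ("status", "deleted")], [("id", "3")]],
   "id", "status", "deleted")

def Spec_compact_full (records : List (List (String × String))) (key : String) (status_field : String) (deleted_value : String) (out : Int) : Prop := out = compact_full_alt records key status_field deleted_value
instance (records : List (List (String × String))) (key : String) (status_field : String) (deleted_value : String) (out : Int) : Decidable (Spec_compact_full records key status_field deleted_value out) := by unfold Spec_compact_full; infer_instance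

-- ===== CLAIM (what is proved, stated in full; the proofs are below) =====
def Claim_equal_compact_full : Prop := ∀ (records : List (List (String × String))) (key : String) (status_field : String) (deleted_value : String), Dom_compact_full records key status_field deleted_value → Pre_compact_full records key status_field deleted_value → Spec_compact_full records key status_field deleted_value (compact_full records key status_field deleted_value)

-- ===== LEMMAS AND PROOFS =====

-- abstract count of A's loop: skip deleted, skip key equal to last written, else count and update
def cnt (key status_field deleted_value : String) :
    Option String → List (List (String × String)) → Int
  | _, [] => 0
  | lwk, r :: rs =>
    if dictGet? r status_field == some deleted_value then cnt key status_field deleted_value lwk rs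
    else if dictGet? r key == lwk then cnt key status_field deleted_value lwk rs
    else 1 + cnt key status_field deleted_value (dictGet? r key) rs

-- dedup count over an already-filtered list
def cdd (key : String) : Option String → List (List (String × String)) → Int
  | _, [] => 0
  | lwk, r :: rs =>
    if dictGet? r key == lwk then cdd key lwk rs
    else 1 + cdd key (dictGet? r key) rs

lemma chunkBy_cons (f : List (String × String) → List (String × String) → Bool)
    (a : List (String × String)) (rest : List (List (String × String))) :
    chunkBy f (a :: rest) = (a :: rest.takeWhile (f a)) :: chunkBy f (rest.dropWhile (f a)) := by
  conv_lhs => rw [chunkBy]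

lemma foldA (key status_field deleted_value : String) (records : List (List (String × String))) :
    ∀ (n i : Nat) (recs : List (List (String × String))) (write : Int) (lwk : Option String),
    records.length - i ≤ n →
    recs.length = records.length →
    (∀ j : Nat, i ≤ j → recs[j]? = records[j]?) →
    0 ≤ write → write ≤ (i : Int) →
    ((PySem.List.pyRange (i : Int) (records.length : Int) 1).foldl
      (fun (s : List (List (String × String)) × Int × Option String) read =>
        let record := PySem.List.pyGetD s.1 read []
        if dictGet? record status_field == some deleted_value then s
        else if dictGet? record key == s.2.2 then s
        else (s.1.set s.2.1.toNat record, s.2.1 + 1, dictGet? record key))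
      (recs, write, lwk)).2.1
      = write + cnt key status_field deleted_value lwk (records.drop i) := by
  intro n
  induction n with
  | zero =>
    intro i recs write lwk hn hlen hagree hw0 hwi
    have hle : records.length ≤ i := by omega
    rw [PySem.List.pyRange_one_eq_nil (by exact_mod_cast hle)]
    simp [List.drop_eq_nil_of_le hle, cnt]
  | succ n ih =>
    intro i recs write lwk hn hlen hagree hw0 hwi
    by_cases hlt : i < records.length
    · have hcast : (i : Int) < (records.length : Int) := by exact_mod_cast hlt
      rw [PySem.List.pyRange_one_cons hcast, List.foldl_cons]
      have hget : PySem.List.pyGetD recs ((i : Nat) : Int) [] = records[i] := by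
        rw [PySem.List.pyGetD_natCast]
        have h1 := hagree i (le_refl i)
        rw [List.getElem?_eq_getElem hlt] at h1
        simp [List.getD, h1]
      have hdrop : records.drop i = records[i] :: records.drop (i + 1) :=
        List.drop_eq_getElem_cons hlt
      have hcast1 : (i : Int) + 1 = ((i + 1 : Nat) : Int) := by push_cast; ring
      by_cases hdel : (dictGet? records[i] status_field == some deleted_value) = true
      · simp only [hget, hdel, if_true]
        rw [hcast1, ih (i+1) recs write lwk (by omega) hlen
          (fun j hj => hagree j (by omega)) hw0 (by omega), hdrop]
        simp [cnt, hdel]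
      · by_cases hdup : (dictGet? records[i] key == lwk) = true
        · simp only [hget, hdel, hdup, if_true, if_false, Bool.false_eq_true]
          rw [hcast1, ih (i+1) recs write lwk (by omega) hlen
            (fun j hj => hagree j (by omega)) hw0 (by omega), hdrop]
          simp [cnt, hdel, hdup]
        · simp only [hget, hdel, hdup, if_false, Bool.false_eq_true]
          have hset_len : (recs.set write.toNat records[i]).length = records.length := by
            simp [hlen]
          have hset_agree : ∀ j : Nat, i + 1 ≤ j →
              (recs.set write.toNat records[i])[j]? = records[j]? := by
            intro j hj
            rw [List.getElem?_set_ne (by omega)]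
            exact hagree j (by omega)
          rw [hcast1, ih (i+1) (recs.set write.toNat records[i]) (write + 1)
            (dictGet? records[i] key) (by omega) hset_len hset_agree (by omega) (by omega), hdrop]
          simp only [cnt, hdel, hdup, if_false, Bool.false_eq_true]
          omega
    · have hle : records.length ≤ i := by omega
      rw [PySem.List.pyRange_one_eq_nil (by exact_mod_cast hle)]
      simp [List.drop_eq_nil_of_le hle, cnt]

lemma cnt_filter (key status_field deleted_value : String)
    (l : List (List (String × String))) (lwk : Option String) :
    cnt key status_field deleted_value lwk l
      = cdd key lwk (l.filter (fun r => !(dictGet? r status_field == some deleted_value))) := by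
  induction l generalizing lwk with
  | nil => simp [cnt, cdd]
  | cons a rest ih =>
    by_cases h : dictGet? a status_field == some deleted_value
    · simp [cnt, h, ih]
    · by_cases h2 : dictGet? a key == lwk <;>
        simp [cnt, cdd, h, h2, ih]

lemma cdd_chunk (key : String) :
    ∀ (n : Nat) (l : List (List (String × String))), l.length ≤ n →
    (∀ r ∈ l, (dictGet? r key).isSome) →
    (cdd key none l = ((chunkBy (fun a b => dictGet? a key == dictGet? b key) l).length : Int)
     ∧ ∀ k : String, cdd key (some k) l
        = ((chunkBy (fun a b => dictGet? a key == dictGet? b key)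
            (l.dropWhile (fun b => dictGet? b key == some k))).length : Int)) := by
  intro n
  induction n with
  | zero =>
    intro l hl _
    have : l = [] := List.eq_nil_of_length_eq_zero (Nat.le_zero.mp hl)
    subst this
    simp [cdd, chunkBy]
  | succ n ih =>
    intro l hl hsome
    cases l with
    | nil => simp [cdd, chunkBy]
    | cons a rest =>
      have hrest : rest.length ≤ n := by simpa using hl
      have hsr : ∀ r ∈ rest, (dictGet? r key).isSome := fun r hr => hsome r (List.mem_cons_of_mem _ hr)
      obtain ⟨ka, hka⟩ := Option.isSome_iff_exists.mp (hsome a (List.mem_cons_self))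
      have flip : ∀ k : String, (fun b => dictGet? a key == dictGet? b key)
          = (fun b : List (String × String) => dictGet? b key == dictGet? a key) := by
        intro k; funext b; exact BEq.comm
      have main : cdd key (some ka) rest
          = ((chunkBy (fun a b => dictGet? a key == dictGet? b key)
              (rest.dropWhile (fun b => dictGet? b key == some ka))).length : Int) :=
        (ih rest hrest hsr).2 ka
      constructor
      · -- none case: head always counted
        have hne : (dictGet? a key == (none : Option String)) = false := by
          simp [hka]
        rw [chunkBy_cons]
        simp only [cdd, hne, List.length_cons]
        rw [flip "", hka] at *
        rw [main]
        push_cast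
        ring
      · intro k
        by_cases h : dictGet? a key == some k
        · -- head skipped both sides
          have hdrop : (a :: rest).dropWhile (fun b => dictGet? b key == some k)
              = rest.dropWhile (fun b => dictGet? b key == some k) := by
            simp [h]
          have heq : k = ka := by
            have := (beq_iff_eq).mp h; rw [hka] at this; exact (Option.some.inj this).symm
          rw [hdrop]
          simp only [cdd, h, if_true]
          subst heq
          exact main
        · have hdrop : (a :: rest).dropWhile (fun b => dictGet? b key == some k)
              = a :: rest := by
            simp [h]
          rw [hdrop, chunkBy_cons]
          simp only [cdd, h, List.length_cons]
          rw [flip "", hka] at *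
          rw [main]
          push_cast
          ring

theorem compact_full_spec : Claim_equal_compact_full := by
  intro records key status_field deleted_value _ hpre
  unfold Spec_compact_full
  have hpre' : ∀ r ∈ records,
      (dictGet? r status_field == some deleted_value) = true ∨ (dictGet? r key).isSome = true := by
    unfold Pre_compact_full at hpre
    simp only [List.all_eq_true, Bool.or_eq_true] at hpre
    exact hpre
  have hA : compact_full records key status_field deleted_value
      = cnt key status_field deleted_value none records := by
    by_cases hnil : records = []
    · subst hnil; simp [compact_full, cnt]
    · unfold compact_full
      rw [if_neg hnil]
      have h0 : ((0 : Nat) : Int) = (0 : Int) := rfl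
      have := foldA key status_field deleted_value records records.length 0 records 0 none
        (by omega) rfl (fun j _ => rfl) (by norm_num) (by norm_num)
      rw [h0] at this
      rw [this, List.drop_zero]
      ring
  rw [hA, cnt_filter]
  unfold compact_full_alt
  have hk : ∀ r ∈ records.filter (fun r => !(dictGet? r status_field == some deleted_value)),
      (dictGet? r key).isSome := by
    intro r hr
    obtain ⟨hmem, hkeep⟩ := List.mem_filter.mp hr
    rcases hpre' r hmem with h | h
    · simp [h] at hkeep
    · exact h
  rw [(cdd_chunk key _ _ le_rfl hk).1]
  simp
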